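-- pv_equiv track=rewrite | github.com/LSOrer/EDQD | interpretability.py | check_coarse_org_values
-- ===== SOURCE A (Python) =====
-- def check_coarse_org_values(log):
--     """
--     Check whether the organizational extension of the XES standard records only org:group or org:role.
--     If org:resource is present in the event log, return nothing.
--     If only org:group is recorded, return "Coarse resource information: only org:group is recorded".
--     If only org:role is recorded, return "Coarse resource information: only org:role is recorded".
--     """
--     org_group_present = False
--     org_role_present = False
--     org_resource_present = False
--
--     for trace in log:
--         for event in trace.get('events', []):
--             if 'org:group' in event:
--                 org_group_present = True
--             if 'org:role' in event:
--                 org_role_present = True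
--             if 'org:resource' in event:
--                 org_resource_present = True
--
--     if org_resource_present:
--         return "Resource information are sufficiently granular for meaningful analysis"
--     elif org_group_present and not org_role_present:
--         return "Coarse resource information: only org:group is recorded"
--     elif org_role_present and not org_group_present:
--         return "Coarse resource information: only org:role is recorded"
--     elif org_group_present and org_role_present:
--         return "Coarse resource information: both org:group and org:role are recorded, but org:resource is missing"
--
--     return None
-- ===== SOURCE B (Python) =====
-- def check_coarse_org_values(log):
--     def present(key):
--         return any(key in event
--                    for trace in log
--                    for event in trace.get('events', []))
--
--     if present('org:resource'):
--         return "Resource information are sufficiently granular for meaningful analysis"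
--     group = present('org:group')
--     role = present('org:role')
--     if group and not role:
--         return "Coarse resource information: only org:group is recorded"
--     if role and not group:
--         return "Coarse resource information: only org:role is recorded"
--     if group and role:
--         return "Coarse resource information: both org:group and org:role are recorded, but org:resource is missing"
--     return None
-- ===== Notes on version B (the rewrite author's own statement) =====
-- stated objective: idiomatic
-- what changed: Replaces the single fused loop with three boolean flags by three independent short-circuiting any(...) scans over the flattened event stream, one per org attribute, with the resource scan deciding the first verdict before the other two scans even run.
import Mathlib
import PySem

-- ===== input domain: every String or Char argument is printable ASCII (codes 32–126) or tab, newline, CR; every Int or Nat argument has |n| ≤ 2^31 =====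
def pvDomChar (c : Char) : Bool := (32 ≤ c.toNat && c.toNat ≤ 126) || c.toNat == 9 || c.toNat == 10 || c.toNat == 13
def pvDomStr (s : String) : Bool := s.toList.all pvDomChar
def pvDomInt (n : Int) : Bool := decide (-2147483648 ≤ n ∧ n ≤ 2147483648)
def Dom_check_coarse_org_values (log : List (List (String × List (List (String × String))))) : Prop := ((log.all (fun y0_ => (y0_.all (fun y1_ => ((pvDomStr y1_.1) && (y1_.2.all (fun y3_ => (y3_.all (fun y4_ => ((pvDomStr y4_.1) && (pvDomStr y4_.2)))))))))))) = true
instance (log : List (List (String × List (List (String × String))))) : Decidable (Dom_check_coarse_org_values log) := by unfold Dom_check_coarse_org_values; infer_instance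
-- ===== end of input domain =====

-- B replaces A's single fused loop with three boolean flags by three independent
-- short-circuiting `any` scans of the flattened event stream (one per org attribute);
-- the verdict logic is unchanged. Objective: idiomatic.

-- shared Python primitives: `'key' in event` (dict membership) and `trace.get('events', [])`
def pvKeyIn (key : String) (event : List (String × String)) : Bool :=
  event.any (fun kv => kv.1 == key)

def pvGetEvents (trace : List (String × List (List (String × String)))) :
    List (List (String × String)) :=
  match trace.find? (fun kv => kv.1 == "events") with
  | some kv => kv.2
  | none => []

-- ===== PORT A =====
def check_coarse_org_values (log : List (List (String × List (List (String × String))))) : Option String :=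
  let st : Bool × Bool × Bool :=
    log.foldl (fun st trace =>
      (pvGetEvents trace).foldl (fun (st : Bool × Bool × Bool) event =>
        ((if pvKeyIn "org:group" event then true else st.1),
         (if pvKeyIn "org:role" event then true else st.2.1),
         (if pvKeyIn "org:resource" event then true else st.2.2))) st)
      (false, false, false)
  if st.2.2 then
    some "Resource information are sufficiently granular for meaningful analysis"
  else if st.1 && !st.2.1 then
    some "Coarse resource information: only org:group is recorded"
  else if st.2.1 && !st.1 then
    some "Coarse resource information: only org:role is recorded"
  else if st.1 && st.2.1 then
    some "Coarse resource information: both org:group and org:role are recorded, but org:resource is missing"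
  else none

-- ===== PORT B =====
def pvPresent (log : List (List (String × List (List (String × String))))) (key : String) : Bool :=
  log.any (fun trace => (pvGetEvents trace).any (fun event => pvKeyIn key event))

def check_coarse_org_values_alt (log : List (List (String × List (List (String × String))))) : Option String :=
  if pvPresent log "org:resource" then
    some "Resource information are sufficiently granular for meaningful analysis"
  else
    let group := pvPresent log "org:group"
    let role := pvPresent log "org:role"
    if group && !role then
      some "Coarse resource information: only org:group is recorded"
    else if role && !group then
      some "Coarse resource information: only org:role is recorded"
    else if group && role then
      some "Coarse resource information: both org:group and org:role are recorded, but org:resource is missing"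
    else none

-- ===== PRECONDITION & SPEC =====
def Spec_check_coarse_org_values (log : List (List (String × List (List (String × String))))) (out : Option String) : Prop := out = check_coarse_org_values_alt log
instance (log : List (List (String × List (List (String × String))))) (out : Option String) : Decidable (Spec_check_coarse_org_values log out) := by unfold Spec_check_coarse_org_values; infer_instance

-- ===== CLAIM (what is proved, stated in full; the proofs are below) =====
def Claim_equal_check_coarse_org_values : Prop := ∀ (log : List (List (String × List (List (String × String))))), Dom_check_coarse_org_values log → Spec_check_coarse_org_values log (check_coarse_org_values log)

-- ===== LEMMAS AND PROOFS =====

-- A's inner event loop ORs each flag with the presence of its key among the events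
lemma foldl_events_eq (events : List (List (String × String))) (st : Bool × Bool × Bool) :
    events.foldl (fun (st : Bool × Bool × Bool) event =>
        ((if pvKeyIn "org:group" event then true else st.1),
         (if pvKeyIn "org:role" event then true else st.2.1),
         (if pvKeyIn "org:resource" event then true else st.2.2))) st
      = (st.1 || events.any (pvKeyIn "org:group"),
         st.2.1 || events.any (pvKeyIn "org:role"),
         st.2.2 || events.any (pvKeyIn "org:resource")) := by
  induction events generalizing st with
  | nil => simp
  | cons e es ih =>
      rw [List.foldl_cons, ih]
      cases hg : pvKeyIn "org:group" e <;> cases hr : pvKeyIn "org:role" e <;>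
        cases hres : pvKeyIn "org:resource" e <;> simp [List.any_cons, hg, hr, hres]

-- A's outer trace loop computes exactly B's three presence scans
lemma foldl_traces_eq (log : List (List (String × List (List (String × String)))))
    (st : Bool × Bool × Bool) :
    log.foldl (fun st trace =>
      (pvGetEvents trace).foldl (fun (st : Bool × Bool × Bool) event =>
        ((if pvKeyIn "org:group" event then true else st.1),
         (if pvKeyIn "org:role" event then true else st.2.1),
         (if pvKeyIn "org:resource" event then true else st.2.2))) st) st
      = (st.1 || pvPresent log "org:group",
         st.2.1 || pvPresent log "org:role",
         st.2.2 || pvPresent log "org:resource") := by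
  induction log generalizing st with
  | nil => simp [pvPresent]
  | cons t ts ih =>
      rw [List.foldl_cons, foldl_events_eq, ih]
      simp [pvPresent, List.any_cons, Bool.or_assoc]

-- ===== VERDICT (by name: the statement is the Claim_ definition above) =====
theorem check_coarse_org_values_spec : Claim_equal_check_coarse_org_values := by
  intro log _
  unfold Spec_check_coarse_org_values check_coarse_org_values check_coarse_org_values_alt
  rw [foldl_traces_eq]
  simp only [Bool.false_or]
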